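-- pv_equiv track=rewrite | github.com/wilmurillo-ai/Design-Assistant | .skills/openclaw-skills/skills/bladezhang/ddzaishot/src/cards.py | _is_plane
-- ===== SOURCE A (Python) =====
-- from typing import List, Dict, Set, Tuple
-- from collections import Counter
--
-- def _is_plane(cards: List[int], counter: Counter) -> bool:
--     """检查是否是飞机"""
--     triples = [c for c, cnt in counter.items() if cnt >= 3]
--     if len(triples) < 2:
--         return False
--
--     triples.sort()
--     # 检查连续性
--     for i in range(1, len(triples)):
--         if triples[i] - triples[i-1] != 1:
--             return False
--
--     # 不能包含2
--     if any(t >= 15 for t in triples):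
--         return False
--
--     return len(cards) == len(triples) * 3
-- ===== SOURCE B (Python) =====
-- from collections import Counter
--
-- def _is_plane(cards, counter):
--     triples = [c for c, cnt in counter.items() if cnt >= 3]
--     if len(triples) < 2:
--         return False
--     mn, mx = min(triples), max(triples)
--     if mx >= 15:
--         return False
--     if mx - mn != len(triples) - 1:
--         return False
--     return len(cards) == len(triples) * 3
-- ===== Notes on version B (the rewrite author's own statement) =====
-- stated objective: simpler
-- what changed: Replaces the sort plus pairwise-difference scan with a min/max span test (mx - mn == len(triples) - 1), valid because Counter keys are distinct; the 15-bound check becomes a single comparison against mx.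
import Mathlib
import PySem

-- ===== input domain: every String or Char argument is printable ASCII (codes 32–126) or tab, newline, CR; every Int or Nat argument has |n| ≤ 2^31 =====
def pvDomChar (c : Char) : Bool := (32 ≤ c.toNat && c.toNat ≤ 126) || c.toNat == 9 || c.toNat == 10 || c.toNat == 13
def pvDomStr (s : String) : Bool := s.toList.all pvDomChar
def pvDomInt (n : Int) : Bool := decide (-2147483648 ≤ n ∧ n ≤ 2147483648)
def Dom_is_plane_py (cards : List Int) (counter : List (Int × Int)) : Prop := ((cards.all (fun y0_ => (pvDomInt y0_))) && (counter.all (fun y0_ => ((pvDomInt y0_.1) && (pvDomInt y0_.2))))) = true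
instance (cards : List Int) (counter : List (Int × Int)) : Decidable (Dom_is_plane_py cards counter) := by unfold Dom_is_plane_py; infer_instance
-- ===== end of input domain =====

-- B replaces A's sort + adjacent-difference scan over the triple ranks by a min/max span
-- test (simpler: no sort, no pairwise loop); equal because Counter keys are distinct.

-- ===== PORT A =====
-- the 'for i in range(1, len(ts)): if ts[i] - ts[i-1] != 1: return False' loop
def pvChain : List Int → Bool
  | [] => true
  | [_] => true
  | a :: b :: rest => if b - a ≠ 1 then false else pvChain (b :: rest)

def is_plane_py (cards : List Int) (counter : List (Int × Int)) : Bool :=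
  let triples := ((PySem.Dict.ofList counter).items.filter (fun p => decide (p.2 ≥ 3))).map (·.1)
  if triples.length < 2 then false
  else
    let ts := PySem.List.sorted triples (fun x => x) false
    if pvChain ts = false then false
    else if ts.any (fun t => decide (t ≥ 15)) then false
    else decide (cards.length = ts.length * 3)

-- ===== PORT B =====
def is_plane_py_alt (cards : List Int) (counter : List (Int × Int)) : Bool :=
  let triples := ((PySem.Dict.ofList counter).items.filter (fun p => decide (p.2 ≥ 3))).map (·.1)
  if triples.length < 2 then false
  else
    -- min()/max() cannot raise here: triples is nonempty by the guard above
    match PySem.List.min? triples (fun x => x), PySem.List.max? triples (fun x => x) with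
    | some mn, some mx =>
        if mx ≥ 15 then false
        else if mx - mn ≠ (triples.length : Int) - 1 then false
        else decide (cards.length = triples.length * 3)
    | _, _ => false

-- ===== PRECONDITION & SPEC =====
def Spec_is_plane_py (cards : List Int) (counter : List (Int × Int)) (out : Bool) : Prop := out = is_plane_py_alt cards counter
instance (cards : List Int) (counter : List (Int × Int)) (out : Bool) : Decidable (Spec_is_plane_py cards counter out) := by unfold Spec_is_plane_py; infer_instance

-- ===== CLAIM (what is proved, stated in full; the proofs are below) =====
def Claim_equal_is_plane_py : Prop := ∀ (cards : List Int) (counter : List (Int × Int)), Dom_is_plane_py cards counter → Spec_is_plane_py cards counter (is_plane_py cards counter)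

-- ===== LEMMAS AND PROOFS =====

-- in a strictly increasing list a :: s, the maximum is at least a + s.length
lemma pv_max_ge (s : List Int) (a mx : Int) (h : (a :: s).Pairwise (· < ·))
    (hmem : mx ∈ a :: s) (hmx : ∀ y ∈ a :: s, y ≤ mx) : a + s.length ≤ mx := by
  induction s generalizing a with
  | nil => simp at hmem; simp [hmem]
  | cons b t ih =>
    have hab : a < b := (List.pairwise_cons.1 h).1 b (by simp)
    have h' : (b :: t).Pairwise (· < ·) := (List.pairwise_cons.1 h).2
    have hmem' : mx ∈ b :: t := by
      rcases List.mem_cons.1 hmem with h1 | h1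
      · exfalso; have := hmx b (by simp); omega
      · exact h1
    have := ih b h' hmem' (fun y hy => hmx y (List.mem_cons_of_mem _ hy))
    simp only [List.length_cons] at *
    push_cast at *
    omega

lemma pvChain_iff (s : List Int) (a mx : Int) (h : (a :: s).Pairwise (· < ·))
    (hmem : mx ∈ a :: s) (hmx : ∀ y ∈ a :: s, y ≤ mx) :
    pvChain (a :: s) = decide (mx - a = s.length) := by
  induction s generalizing a with
  | nil =>
    simp at hmem; subst hmem; simp [pvChain]
  | cons b t ih =>
    have hab : a < b := (List.pairwise_cons.1 h).1 b (by simp)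
    have h' : (b :: t).Pairwise (· < ·) := (List.pairwise_cons.1 h).2
    have hmem' : mx ∈ b :: t := by
      rcases List.mem_cons.1 hmem with h1 | h1
      · exfalso; have := hmx b (by simp); omega
      · exact h1
    have hmx' : ∀ y ∈ b :: t, y ≤ mx := fun y hy => hmx y (List.mem_cons_of_mem _ hy)
    have hge : b + t.length ≤ mx := pv_max_ge t b mx h' hmem' hmx'
    have ihb := ih b h' hmem' hmx'
    show (if b - a ≠ 1 then false else pvChain (b :: t)) = _
    by_cases hba : b - a = 1
    · have h1 : ¬ (b - a ≠ 1) := by omega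
      simp only [if_neg h1, ihb, List.length_cons, decide_eq_decide]
      push_cast
      omega
    · have h2 : ¬ (mx - a = ((t.length : Int) + 1)) := by omega
      simp only [if_pos hba, List.length_cons]
      push_cast
      simp [h2]

-- ===== VERDICT (by name: the statement is the Claim_ definition above) =====
theorem is_plane_py_spec : Claim_equal_is_plane_py := by
  intro cards counter _
  show is_plane_py cards counter = is_plane_py_alt cards counter
  unfold is_plane_py is_plane_py_alt
  set t : List Int := ((PySem.Dict.ofList counter).items.filter (fun p => decide (p.2 ≥ 3))).map (·.1) with ht
  by_cases hlen : t.length < 2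
  · simp [hlen]
  · simp only [if_neg hlen]
    have hnd : t.Nodup := by
      have hsub : t.Sublist ((PySem.Dict.ofList counter).items.map (·.1)) :=
        List.Sublist.map (fun p : Int × Int => p.1) List.filter_sublist
      have hk : ((PySem.Dict.ofList counter).items.map (·.1)).Nodup :=
        PySem.Dict.nodup_keys_ofList counter
      exact hk.sublist hsub
    have hne : t ≠ [] := by intro h; rw [h] at hlen; simp at hlen
    obtain ⟨mn, hmn⟩ : ∃ mn, PySem.List.min? t (fun x => x) = some mn := by
      cases h : PySem.List.min? t (fun x => x) with
      | none => exact absurd ((PySem.List.min?_eq_none_iff t (fun x => x)).1 h) hne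
      | some m => exact ⟨m, rfl⟩
    obtain ⟨mx, hmx⟩ : ∃ mx, PySem.List.max? t (fun x => x) = some mx := by
      cases h : PySem.List.max? t (fun x => x) with
      | none => exact absurd ((PySem.List.max?_eq_none_iff t (fun x => x)).1 h) hne
      | some m => exact ⟨m, rfl⟩
    rw [hmn, hmx]
    have hmnmem : mn ∈ t := PySem.List.min?_mem hmn
    have hmnmin : ∀ y ∈ t, mn ≤ y := PySem.List.min?_isMin hmn
    have hmxmem : mx ∈ t := PySem.List.max?_mem hmx
    have hmxmax : ∀ y ∈ t, y ≤ mx := PySem.List.max?_isMax hmx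
    have hperm : (PySem.List.sorted t (fun x => x) false).Perm t := PySem.List.sorted_perm t _ _
    have hpw : (PySem.List.sorted t (fun x => x) false).Pairwise (· ≤ ·) := PySem.List.sorted_pairwise t _
    have hnds : (PySem.List.sorted t (fun x => x) false).Nodup := hperm.nodup_iff.2 hnd
    have hlt : (PySem.List.sorted t (fun x => x) false).Pairwise (· < ·) :=
      (hpw.and hnds).imp (fun h => lt_of_le_of_ne h.1 h.2)
    cases hs : PySem.List.sorted t (fun x => x) false with
    | nil =>
      rw [hs] at hperm
      exact absurd hperm.nil_eq.symm hne
    | cons a s' =>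
      rw [hs] at hperm hpw hlt
      have hmem : ∀ y, y ∈ a :: s' ↔ y ∈ t := fun y => hperm.mem_iff
      have hmxmem' : mx ∈ a :: s' := (hmem mx).2 hmxmem
      have hmxmax' : ∀ y ∈ a :: s', y ≤ mx := fun y hy => hmxmax y ((hmem y).1 hy)
      have hamn : mn = a := by
        have h1 : a ≤ mn := by
          rcases List.mem_cons.1 ((hmem mn).2 hmnmem) with h0 | h0
          · omega
          · exact le_of_lt ((List.pairwise_cons.1 hlt).1 mn h0)
        have h2 : mn ≤ a := hmnmin a ((hmem a).1 (by simp))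
        omega
      have hlt2 : t.length = s'.length + 1 := by
        have := hperm.length_eq; simpa using this.symm
      have hchain := pvChain_iff s' a mx hlt hmxmem' hmxmax'
      have hany : (a :: s').any (fun x => decide (x ≥ 15)) = decide (mx ≥ 15) := by
        by_cases h15 : mx ≥ 15
        · simp only [decide_eq_true h15, List.any_eq_true]
          exact ⟨mx, hmxmem', by simpa using h15⟩
        · have : ∀ y ∈ a :: s', ¬ (y ≥ 15) := fun y hy => by have := hmxmax' y hy; omega
          simp only [decide_eq_false h15, List.any_eq_false]
          intro y hy; simpa using this y hy
      rw [hchain, hany, hamn]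
      by_cases hspan : mx - a = (s'.length : Int)
      · by_cases h15 : mx ≥ 15
        · simp [h15]
        · simp [hspan, h15, hlt2]
      · have hspan' : mx - a ≠ (t.length : Int) - 1 := by rw [hlt2]; push_cast; omega
        by_cases h15 : mx ≥ 15
        · simp [h15]
        · simp [hspan, hspan', h15]
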